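-- pv_equiv track=rewrite | github.com/v2-io/agentic-systems | bin/lint-md.py | fix_begin_align
-- ===== SOURCE A (Python) =====
-- def fix_begin_align(line):
--     r"""Replace \begin{align} with \begin{aligned}, skipping code spans."""
--     # Process outside code spans only
--     result = []
--     i = 0
--     while i < len(line):
--         if line[i] == '`':
--             end = line.find('`', i + 1)
--             if end == -1:
--                 result.append(line[i:])
--                 break
--             result.append(line[i:end + 1])
--             i = end + 1
--             continue
--         result.append(line[i])
--         i += 1
--     out = ''.join(result)
--     # Now do the replacement only on the non-code parts
--     # Actually, rebuild properly: walk segments, replace only outside backticks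
--     parts = []
--     i = 0
--     while i < len(line):
--         if line[i] == '`':
--             end = line.find('`', i + 1)
--             if end == -1:
--                 parts.append(line[i:])
--                 break
--             parts.append(line[i:end + 1])  # code span, preserve
--             i = end + 1
--             continue
--         # Find next backtick or end
--         next_bt = line.find('`', i)
--         if next_bt == -1:
--             segment = line[i:]
--             parts.append(
--                 segment.replace(r'\begin{align}', r'\begin{aligned}')
--                        .replace(r'\end{align}', r'\end{aligned}'))
--             break
--         segment = line[i:next_bt]
--         parts.append(
--             segment.replace(r'\begin{align}', r'\begin{aligned}')
--                    .replace(r'\end{align}', r'\end{aligned}'))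
--         i = next_bt
--     return ''.join(parts)
-- ===== SOURCE B (Python) =====
-- def fix_begin_align(line):
--     r"""Replace \begin{align} with \begin{aligned}, skipping code spans."""
--     # Backticks pair up greedily left to right, so after split('`') the
--     # even-indexed pieces are outside code spans (an unterminated trailing
--     # span lands at an odd index and is preserved verbatim, as intended).
--     return '`'.join(
--         piece if i % 2 else
--         piece.replace('\\begin{align}', '\\begin{aligned}')
--              .replace('\\end{align}', '\\end{aligned}')
--         for i, piece in enumerate(line.split('`')))
-- ===== Notes on version B (the rewrite author's own statement) =====
-- stated objective: idiomatic
-- what changed: Replaces the manual index/find state machine (plus a dead first loop that rebuilt the string and discarded it) with split('`') into alternating outside/inside pieces, applying the replacements only to even-indexed pieces and rejoining with '`'.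
import Mathlib
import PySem

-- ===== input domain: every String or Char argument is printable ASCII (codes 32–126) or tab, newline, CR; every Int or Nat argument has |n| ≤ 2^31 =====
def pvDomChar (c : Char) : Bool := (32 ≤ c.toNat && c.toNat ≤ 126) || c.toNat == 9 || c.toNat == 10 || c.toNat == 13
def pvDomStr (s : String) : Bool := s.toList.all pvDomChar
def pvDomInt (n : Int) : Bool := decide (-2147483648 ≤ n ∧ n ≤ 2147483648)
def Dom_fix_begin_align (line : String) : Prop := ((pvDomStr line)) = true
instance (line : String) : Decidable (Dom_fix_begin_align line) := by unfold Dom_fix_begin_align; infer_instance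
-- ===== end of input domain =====

-- B replaces A's manual index/find state machine (and its dead first loop) by split('`') /
-- alternating replace / join('`'): same values, idiomatic structure (objective: idiomatic).

-- ===== PORT A =====

-- segment.replace(r'\begin{align}', r'\begin{aligned}').replace(r'\end{align}', r'\end{aligned}')
def pvRepl (s : List Char) : List Char :=
  PySem.Chars.replace
    (PySem.Chars.replace s "\\begin{align}".toList "\\begin{aligned}".toList)
    "\\end{align}".toList "\\end{aligned}".toList

-- termination helper for pvPartsA: a backtick found in c :: tail with c ≠ '`' is at index ≥ 1
theorem pvFindBtPos (c : Char) (tail : List Char) (hc : ¬ c = '`')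
    (h : ¬ PySem.Chars.find (c :: tail) ['`'] = -1) :
    1 ≤ (PySem.Chars.find (c :: tail) ['`']).toNat := by
  have hle := PySem.Chars.neg_one_le_find (c :: tail) ['`']
  have h0 : 0 ≤ PySem.Chars.find (c :: tail) ['`'] := by omega
  have hspec := (PySem.Chars.find_spec (s := c :: tail) (sub := ['`']) h0).1
  by_contra hlt
  have hz : (PySem.Chars.find (c :: tail) ['`']).toNat = 0 := by omega
  rw [hz, List.drop_zero] at hspec
  rcases hspec with ⟨t, ht⟩
  simp at ht
  exact hc ht.1.symm

-- first while-loop of A (its result 'out' is computed and never used)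
def pvDeadA (rest : List Char) : List (List Char) :=
  match rest with
  | [] => []
  | c :: tail =>
    if c = '`' then
      let e := PySem.Chars.find tail ['`']                       -- line.find('`', i + 1)
      if e = -1 then [c :: tail]                                 -- append line[i:], break
      else (c :: tail.take (e.toNat + 1)) :: pvDeadA (tail.drop (e.toNat + 1))
    else [c] :: pvDeadA tail                                     -- result.append(line[i]); i += 1
termination_by rest.length
decreasing_by
  all_goals simp [List.length_drop]

-- second while-loop of A, building 'parts' (state i kept as the suffix line[i:])
def pvPartsA (rest : List Char) : List (List Char) :=
  match rest with
  | [] => []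
  | c :: tail =>
    if hc : c = '`' then
      let e := PySem.Chars.find tail ['`']                       -- end = line.find('`', i + 1)
      if e = -1 then [c :: tail]                                 -- parts.append(line[i:]), break
      else (c :: tail.take (e.toNat + 1)) :: pvPartsA (tail.drop (e.toNat + 1))
    else
      let nb := PySem.Chars.find (c :: tail) ['`']               -- next_bt = line.find('`', i)
      if hnb : nb = -1 then [pvRepl (c :: tail)]                 -- replace on line[i:], break
      else pvRepl ((c :: tail).take nb.toNat) :: pvPartsA ((c :: tail).drop nb.toNat)
termination_by rest.length
decreasing_by
  · simp [List.length_drop]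
  · have := pvFindBtPos c tail hc hnb
    simp [List.length_drop]
    omega

def fix_begin_align (line : String) : String :=
  let _out := PySem.Chars.join [] (pvDeadA line.toList)          -- out = ''.join(result)  (unused)
  String.ofList (PySem.Chars.join [] (pvPartsA line.toList))     -- return ''.join(parts)

-- ===== PORT B =====

-- piece if i % 2 else piece.replace(...).replace(...)
def pvAltPiece (p : Int × List Char) : List Char :=
  if p.1 % 2 == 0 then pvRepl p.2 else p.2

def fix_begin_align_alt (line : String) : String :=
  String.ofList (PySem.Chars.join ['`']
    ((PySem.List.enumerate (PySem.Chars.splitOn line.toList ['`'])).map pvAltPiece))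

-- ===== PRECONDITION & SPEC =====
def Spec_fix_begin_align (line : String) (out : String) : Prop := out = fix_begin_align_alt line
instance (line : String) (out : String) : Decidable (Spec_fix_begin_align line out) := by unfold Spec_fix_begin_align; infer_instance

-- ===== CLAIM (what is proved, stated in full; the proofs are below) =====
def Claim_equal_fix_begin_align : Prop := ∀ (line : String), Dom_fix_begin_align line → Spec_fix_begin_align line (fix_begin_align line)

-- ===== LEMMAS AND PROOFS =====

-- "is not a backtick", the scanning predicate of both proofs
def pvNB (c : Char) : Bool := !(c == '`')

theorem pvNB_iff (c : Char) : pvNB c = true ↔ c ≠ '`' := by simp [pvNB]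

theorem pvTakeWhile_self_of_not_mem (l : List Char) (h : '`' ∉ l) : l.takeWhile pvNB = l := by
  rw [List.takeWhile_eq_self_iff]
  intro x hx
  rw [pvNB_iff]
  intro he
  exact h (he ▸ hx)

theorem pvDropWhile_head (l : List Char) (x : Char) (b : List Char)
    (hd : l.dropWhile pvNB = x :: b) : x = '`' := by
  induction l generalizing x b with
  | nil => cases hd
  | cons c t ih =>
    rw [List.dropWhile_cons] at hd
    by_cases hpc : pvNB c = true
    · rw [hpc] at hd
      simp at hd
      exact ih x b hd
    · simp at hpc
      rw [hpc] at hd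
      simp [pvNB] at hd hpc
      rw [hd.1] at hpc
      exact hpc

-- on input containing a backtick, dropWhile starts with that backtick
theorem pvMemDrop (l : List Char) (hm : '`' ∈ l) :
    l.dropWhile pvNB = '`' :: (l.dropWhile pvNB).tail := by
  have hne : l.dropWhile pvNB ≠ [] := by
    intro hnil
    rw [List.dropWhile_eq_nil_iff] at hnil
    have := hnil '`' hm
    simp [pvNB] at this
  cases hd : l.dropWhile pvNB with
  | nil => exact absurd hd hne
  | cons x b =>
    have hx := pvDropWhile_head l x b hd
    subst hx
    rfl

theorem pvDropTail_len (l : List Char) (hm : '`' ∈ l) :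
    ((l.dropWhile pvNB).tail).length < l.length := by
  have h1 : (l.dropWhile pvNB).length ≤ l.length := List.length_dropWhile_le _ _
  have h2 := pvMemDrop l hm
  have h3 : (l.dropWhile pvNB).length = ((l.dropWhile pvNB).tail).length + 1 := by
    conv_lhs => rw [h2]
    simp
  have h4 : l ≠ [] := by rintro rfl; cases hm
  omega

-- decomposition of l at its first backtick
theorem pvSplitAt (l : List Char) (hm : '`' ∈ l) :
    l = l.takeWhile pvNB ++ '`' :: (l.dropWhile pvNB).tail := by
  conv_lhs => rw [← List.takeWhile_append_dropWhile (p := pvNB) (l := l)]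
  rw [← pvMemDrop l hm]

-- reference function: both ports are proved equal to this
def pvRef (cs : List Char) : List Char :=
  if hm : '`' ∈ cs then
    if hm2 : '`' ∈ (cs.dropWhile pvNB).tail then
      pvRepl (cs.takeWhile pvNB) ++ '`' :: ((cs.dropWhile pvNB).tail).takeWhile pvNB ++
        '`' :: pvRef ((((cs.dropWhile pvNB).tail).dropWhile pvNB).tail)
    else pvRepl (cs.takeWhile pvNB) ++ '`' :: (cs.dropWhile pvNB).tail
  else pvRepl (cs.takeWhile pvNB)
termination_by cs.length
decreasing_by
  have h1 := pvDropTail_len cs hm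
  have h2 := pvDropTail_len ((cs.dropWhile pvNB).tail) hm2
  omega

theorem pvRepl_nil : pvRepl [] = [] := by decide

theorem pvJoinNil_cons (p : List Char) (rest : List (List Char)) :
    PySem.Chars.join [] (p :: rest) = p ++ PySem.Chars.join [] rest := by
  cases rest with
  | nil => simp [PySem.Chars.join_singleton, PySem.Chars.join_nil]
  | cons q r => rw [PySem.Chars.join_cons_cons]; simp

-- find of a single backtick: -1 if absent, else the takeWhile length (first occurrence)
theorem pvTakeWhileLen (l : List Char) (k : Nat) (hk : l[k]? = some '`')
    (hlt : ∀ i, i < k → l[i]? ≠ some '`') :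
    (l.takeWhile pvNB).length = k := by
  induction l generalizing k with
  | nil => simp at hk
  | cons c tail ih =>
    cases k with
    | zero =>
      simp at hk
      simp [pvNB, hk]
    | succ k' =>
      have hc : c ≠ '`' := by
        intro he; exact hlt 0 (Nat.succ_pos _) (by simp [he])
      simp at hk
      rw [List.takeWhile_cons]
      have hb : pvNB c = true := (pvNB_iff c).mpr hc
      rw [hb]
      simp only [if_true, List.length_cons]
      rw [ih k' hk (fun i hi hbad => hlt (i + 1) (by omega) (by simpa using hbad))]

theorem pvFindChar (l : List Char) :
    PySem.Chars.find l ['`'] =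
      if '`' ∈ l then (((l.takeWhile pvNB).length : Nat) : Int) else -1 := by
  by_cases hm : '`' ∈ l
  · simp only [hm, if_true]
    have hinf : ['`'] <:+: l := by
      rcases List.mem_iff_append.mp hm with ⟨s, t, hst⟩
      exact ⟨s, t, by simp [hst]⟩
    have h0 : 0 ≤ PySem.Chars.find l ['`'] := (PySem.Chars.find_nonneg_iff _ _).mpr hinf
    have hspec := PySem.Chars.find_spec (s := l) (sub := ['`']) h0
    set k := (PySem.Chars.find l ['`']).toNat with hkdef
    have hkk : PySem.Chars.find l ['`'] = (k : Int) := by omega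
    rw [hkk]
    congr 1
    have hget : l[k]? = some '`' := by
      rcases hspec.1 with ⟨t, ht⟩
      have h00 : (l.drop k)[0]? = some '`' := by rw [← ht]; rfl
      simpa [List.getElem?_drop] using h00
    have hno : ∀ i, i < k → l[i]? ≠ some '`' := by
      intro i hi he
      apply hspec.2 i (by omega)
      refine ⟨l.drop (i + 1), ?_⟩
      have hie : l[i]? = (l.drop i)[0]? := by simp [List.getElem?_drop]
      rw [hie] at he
      cases hdi : l.drop i with
      | nil => rw [hdi] at he; simp at he
      | cons x xs =>
        rw [hdi] at he
        simp at he
        have hxs : l.drop (i + 1) = xs := by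
          rw [← List.tail_drop, hdi, List.tail_cons]
        simp [he, hxs]
    exact (pvTakeWhileLen l k hget hno).symm
  · simp only [hm, if_false]
    apply (PySem.Chars.find_eq_neg_one_iff _ _).mpr
    intro hinf
    exact hm (hinf.mem (by simp))

-- splitOn.go with a single-char separator, via the fuel-free reference split
def pvSplit (l : List Char) : List (List Char) :=
  if hm : '`' ∈ l then l.takeWhile pvNB :: pvSplit ((l.dropWhile pvNB).tail)
  else [l]
termination_by l.length
decreasing_by
  exact pvDropTail_len l hm

theorem pvSplit_ne_nil (l : List Char) : pvSplit l ≠ [] := by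
  rw [pvSplit]
  split <;> simp

theorem pvSplit_cons_bt (rest : List Char) :
    pvSplit ('`' :: rest) = [] :: pvSplit rest := by
  rw [pvSplit]
  have hm : '`' ∈ '`' :: rest := by simp
  rw [dif_pos hm]
  have htw : ('`' :: rest).takeWhile pvNB = [] := by
    rw [List.takeWhile_cons]; simp [pvNB]
  have hdw : ('`' :: rest).dropWhile pvNB = '`' :: rest := by
    rw [List.dropWhile_cons]; simp [pvNB]
  rw [htw, hdw, List.tail_cons]

theorem pvSplit_cons_ne (c : Char) (rest : List Char) (hc : c ≠ '`') :
    pvSplit (c :: rest) = (pvSplit rest).modifyHead (c :: ·) := by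
  have hb : pvNB c = true := (pvNB_iff c).mpr hc
  have htw : (c :: rest).takeWhile pvNB = c :: rest.takeWhile pvNB := by
    rw [List.takeWhile_cons, hb]; simp
  have hdw : (c :: rest).dropWhile pvNB = rest.dropWhile pvNB := by
    rw [List.dropWhile_cons, hb]; simp
  by_cases hm : '`' ∈ rest
  · have hm' : '`' ∈ c :: rest := by simp [hm]
    rw [pvSplit, dif_pos hm', htw, hdw]
    conv_rhs => rw [pvSplit, dif_pos hm]
    rfl
  · have hm' : '`' ∉ c :: rest := by
      intro h
      rcases List.mem_cons.mp h with h | h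
      · exact hc h.symm
      · exact hm h
    rw [pvSplit, dif_neg hm']
    conv_rhs => rw [pvSplit, dif_neg hm]
    rfl

theorem pvGoEq (fuel : Nat) (l cur : List Char) (acc : List (List Char))
    (hf : l.length < fuel) :
    PySem.Chars.splitOn.go ['`'] fuel l cur acc =
      acc.reverse ++ (pvSplit l).modifyHead (cur.reverse ++ ·) := by
  induction fuel generalizing l cur acc with
  | zero => omega
  | succ f ih =>
    cases l with
    | nil =>
      rw [PySem.Chars.splitOn.go, pvSplit]
      simp
      omega
    | cons c rest =>
      rw [PySem.Chars.splitOn.go]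
      by_cases hc : c = '`'
      · subst hc
        have hpre : List.isPrefixOf ['`'] ('`' :: rest) = true := by simp [List.isPrefixOf]
        simp only [hpre, if_true]
        have hdr : List.drop (List.length ['`']) ('`' :: rest) = rest := by simp
        rw [hdr, ih rest [] (cur.reverse :: acc) (by simp at hf ⊢; omega)]
        rw [pvSplit_cons_bt]
        simp
        cases pvSplit rest with
        | nil => simp
        | cons p ps => simp
      · have hpre : List.isPrefixOf ['`'] (c :: rest) = false := by
          simp [List.isPrefixOf]
          exact fun h => hc h.symm
        rw [hpre]
        simp only [Bool.false_eq_true, if_false]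
        rw [ih rest (c :: cur) acc (by simp at hf ⊢; omega)]
        rw [pvSplit_cons_ne c rest hc]
        cases pvSplit rest with
        | nil => simp
        | cons p ps => simp

theorem pvSplitOnEq (l : List Char) :
    PySem.Chars.splitOn l ['`'] = pvSplit l := by
  rw [PySem.Chars.splitOn, pvGoEq (l.length + 1) l [] [] (by omega)]
  cases hs : pvSplit l with
  | nil => exact absurd hs (pvSplit_ne_nil l)
  | cons p ps => simp

-- the alternating map ignores an even shift of the enumeration start
theorem pvEnumShift (xs : List (List Char)) (s : Int) :
    (PySem.List.enumerate xs (s + 2)).map pvAltPiece =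
      (PySem.List.enumerate xs s).map pvAltPiece := by
  induction xs generalizing s with
  | nil => simp [PySem.List.enumerate_nil]
  | cons x rest ih =>
    rw [PySem.List.enumerate_cons, PySem.List.enumerate_cons]
    simp only [List.map_cons]
    have hmod : (s + 2) % 2 = s % 2 := by omega
    rw [show s + 2 + 1 = s + 1 + 2 by ring, ih (s + 1)]
    simp [pvAltPiece, hmod]

-- A-side: the parts loop starting at a backtick
theorem pvPartsA_bt (b : List Char) :
    PySem.Chars.join [] (pvPartsA ('`' :: b)) =
      if '`' ∈ b then
        '`' :: b.takeWhile pvNB ++ '`' ::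
          PySem.Chars.join [] (pvPartsA ((b.dropWhile pvNB).tail))
      else '`' :: b := by
  rw [pvPartsA]
  rw [dif_pos rfl]
  rw [pvFindChar b]
  by_cases hm : '`' ∈ b
  · rw [if_pos hm]
    rw [if_pos hm]
    set tw := b.takeWhile pvNB with htw
    set r := (b.dropWhile pvNB).tail with hr
    have hsplit : b = tw ++ '`' :: r := pvSplitAt b hm
    have hne : ¬(((tw.length : Nat) : Int) = -1) := by omega
    rw [if_neg hne]
    have hsub : tw.length + 1 - tw.length = 1 := by omega
    have htake : b.take (tw.length + 1) = tw ++ ['`'] := by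
      rw [hsplit, List.take_append, List.take_of_length_le (by omega), hsub]
      rfl
    have hdrop : b.drop (tw.length + 1) = r := by
      rw [hsplit, List.drop_append, List.drop_eq_nil_of_le (by omega), hsub]
      rfl
    have htn : (((tw.length : Nat) : Int)).toNat = tw.length := by omega
    rw [htn, htake, hdrop, pvJoinNil_cons]
    simp
  · rw [if_neg hm]
    rw [if_neg hm]
    rw [if_pos (rfl : (-1 : Int) = -1)]
    rw [PySem.Chars.join_singleton]

theorem pvPartsA_eq (cs : List Char) :
    PySem.Chars.join [] (pvPartsA cs) = pvRef cs := by
  induction hn : cs.length using Nat.strong_induction_on generalizing cs with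
  | _ n ih =>
  subst hn
  rw [pvRef]
  cases cs with
  | nil =>
    rw [pvPartsA]
    rw [dif_neg (by simp : ¬ ('`' ∈ ([] : List Char)))]
    simp [pvRepl_nil, PySem.Chars.join_nil]
  | cons c tail =>
    by_cases hc : c = '`'
    · subst hc
      have hm' : '`' ∈ '`' :: tail := by simp
      rw [dif_pos hm']
      have htw : ('`' :: tail).takeWhile pvNB = [] := by
        rw [List.takeWhile_cons]; simp [pvNB]
      have hdw : ('`' :: tail).dropWhile pvNB = '`' :: tail := by
        rw [List.dropWhile_cons]; simp [pvNB]
      rw [pvPartsA_bt tail]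
      simp only [htw, hdw, List.tail_cons, pvRepl_nil, List.nil_append]
      by_cases hm2 : '`' ∈ tail
      · rw [if_pos hm2, dif_pos hm2]
        have hrec := ih ((tail.dropWhile pvNB).tail).length
          (by have := pvDropTail_len tail hm2; simpa using Nat.lt_succ_of_lt this)
          ((tail.dropWhile pvNB).tail) rfl
        rw [hrec]
      · rw [if_neg hm2, dif_neg hm2]
    · -- c ≠ '`': first a replaced segment
      rw [pvPartsA]
      rw [dif_neg hc]
      rw [pvFindChar (c :: tail)]
      by_cases hm : '`' ∈ c :: tail
      · rw [dif_pos hm]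
        rw [if_pos hm]
        have hne : ¬(((((c :: tail).takeWhile pvNB).length : Nat) : Int) = -1) := by omega
        rw [dif_neg hne]
        set a := (c :: tail).takeWhile pvNB with ha
        have hsplit := pvSplitAt (c :: tail) hm
        have htn : (((a.length : Nat) : Int)).toNat = a.length := by omega
        have htake : (c :: tail).take a.length = a := by
          conv_lhs => rw [hsplit]
          rw [List.take_append]
          simp [← ha]
        have hdrop : (c :: tail).drop a.length = '`' :: ((c :: tail).dropWhile pvNB).tail := by
          conv_lhs => rw [hsplit]
          rw [List.drop_append]
          simp [← ha]
        rw [htn, htake, hdrop, pvJoinNil_cons]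
        rw [pvPartsA_bt]
        set b := ((c :: tail).dropWhile pvNB).tail with hb
        by_cases hm2 : '`' ∈ b
        · rw [if_pos hm2, dif_pos hm2]
          have h1 := pvDropTail_len (c :: tail) hm
          rw [← hb] at h1
          have hrec := ih ((b.dropWhile pvNB).tail).length
            ((pvDropTail_len b hm2).trans h1) ((b.dropWhile pvNB).tail) rfl
          rw [hrec]
          simp
        · rw [if_neg hm2, dif_neg hm2]
      · have ht := pvTakeWhile_self_of_not_mem (c :: tail) hm
        rw [dif_neg hm]
        rw [if_neg hm]
        rw [dif_pos (rfl : (-1 : Int) = -1)]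
        rw [ht, PySem.Chars.join_singleton]

-- B-side
theorem pvAlt_eq (cs : List Char) :
    PySem.Chars.join ['`'] ((PySem.List.enumerate (pvSplit cs)).map pvAltPiece) = pvRef cs := by
  induction hn : cs.length using Nat.strong_induction_on generalizing cs with
  | _ n ih =>
  subst hn
  rw [pvRef, pvSplit]
  by_cases hm : '`' ∈ cs
  · rw [dif_pos hm]
    rw [dif_pos hm]
    set b := (cs.dropWhile pvNB).tail with hb
    rw [pvSplit]
    by_cases hm2 : '`' ∈ b
    · rw [dif_pos hm2]
      rw [dif_pos hm2]
      rw [PySem.List.enumerate_cons, PySem.List.enumerate_cons]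
      simp only [List.map_cons]
      rw [PySem.Chars.join_cons_cons]
      have hsh : (PySem.List.enumerate (pvSplit ((b.dropWhile pvNB).tail)) (0 + 1 + 1)).map pvAltPiece =
          (PySem.List.enumerate (pvSplit ((b.dropWhile pvNB).tail)) 0).map pvAltPiece := by
        have := pvEnumShift (pvSplit ((b.dropWhile pvNB).tail)) 0
        simpa using this
      rw [hsh]
      have hstep : PySem.Chars.join ['`']
          (pvAltPiece (0 + 1, b.takeWhile pvNB) ::
            (PySem.List.enumerate (pvSplit ((b.dropWhile pvNB).tail)) 0).map pvAltPiece) =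
          b.takeWhile pvNB ++ '`' ::
            PySem.Chars.join ['`']
              ((PySem.List.enumerate (pvSplit ((b.dropWhile pvNB).tail)) 0).map pvAltPiece) := by
        cases he : (PySem.List.enumerate (pvSplit ((b.dropWhile pvNB).tail)) 0).map pvAltPiece with
        | nil =>
          exfalso
          rcases List.exists_cons_of_ne_nil (pvSplit_ne_nil ((b.dropWhile pvNB).tail)) with ⟨p, ps, hps⟩
          rw [hps, PySem.List.enumerate_cons] at he
          simp at he
        | cons q qs =>
          rw [PySem.Chars.join_cons_cons, ← he]
          simp [pvAltPiece]
      rw [hstep]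
      have hrec : PySem.Chars.join ['`']
          ((PySem.List.enumerate (pvSplit ((b.dropWhile pvNB).tail)) 0).map pvAltPiece) =
          pvRef ((b.dropWhile pvNB).tail) := by
        apply ih ((b.dropWhile pvNB).tail).length ?_ ((b.dropWhile pvNB).tail) rfl
        have h1 := pvDropTail_len cs hm
        have h2 := pvDropTail_len b hm2
        rw [← hb] at h1
        omega
      rw [hrec]
      simp [pvAltPiece]
    · rw [dif_neg hm2]
      rw [dif_neg hm2]
      rw [PySem.List.enumerate_cons, PySem.List.enumerate_cons, PySem.List.enumerate_nil]
      simp only [List.map_cons, List.map_nil]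
      rw [PySem.Chars.join_cons_cons, PySem.Chars.join_singleton]
      simp [pvAltPiece]
  · rw [dif_neg hm]
    rw [dif_neg hm]
    rw [PySem.List.enumerate_cons, PySem.List.enumerate_nil]
    simp only [List.map_cons, List.map_nil]
    rw [PySem.Chars.join_singleton]
    rw [pvTakeWhile_self_of_not_mem cs hm]
    simp [pvAltPiece]

-- ===== VERDICT (by name: the statement is the Claim_ definition above) =====
theorem fix_begin_align_spec : Claim_equal_fix_begin_align := by
  intro line _
  unfold Spec_fix_begin_align fix_begin_align fix_begin_align_alt
  rw [pvSplitOnEq, pvAlt_eq, pvPartsA_eq]
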